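-- pv_equiv track=rewrite | github.com/naru3-99/sclda_host | tcp/Analyzer/syscall.py | correct_rule2
-- ===== SOURCE A (Python) =====
-- def correct_rule2(s):
--     target_index = []
--     corrected = []
--     flag = False
--     for i, char in enumerate(s):
--         if char == "e":
--             flag = True
--         elif char == "s":
--             flag = False
--
--         if flag and char == "c":
--             target_index.append(i)
--             corrected.append("x")
--         else:
--             corrected.append(char)
--
--     return "".join(corrected), target_index
-- ===== SOURCE B (Python) =====
-- def correct_rule2(s):
--     # Two-mode region scanner: copy text until an 'e' starts an active region,
--     # then rewrite 'c'->'x' (recording indices) until an 's' ends it.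
--     chars = list(s)
--     n = len(chars)
--     out = []
--     idxs = []
--     i = 0
--     while i < n:
--         if chars[i] != "e":
--             out.append(chars[i])
--             i += 1
--             continue
--         # active region: the 'e' itself and everything up to (excluding) the next 's'
--         while i < n and chars[i] != "s":
--             if chars[i] == "c":
--                 out.append("x")
--                 idxs.append(i)
--             else:
--                 out.append(chars[i])
--             i += 1
--     return "".join(out), idxs
-- ===== Notes on version B (the rewrite author's own statement) =====
-- stated objective: alternative
-- what changed: Replaces A's single stateful scan carrying a per-character boolean flag by an explicit two-mode region scanner: an outer copy loop that skips inactive text and an inner loop that rewrites each maximal active region from its opening marker up to the closing marker.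
import Mathlib
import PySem

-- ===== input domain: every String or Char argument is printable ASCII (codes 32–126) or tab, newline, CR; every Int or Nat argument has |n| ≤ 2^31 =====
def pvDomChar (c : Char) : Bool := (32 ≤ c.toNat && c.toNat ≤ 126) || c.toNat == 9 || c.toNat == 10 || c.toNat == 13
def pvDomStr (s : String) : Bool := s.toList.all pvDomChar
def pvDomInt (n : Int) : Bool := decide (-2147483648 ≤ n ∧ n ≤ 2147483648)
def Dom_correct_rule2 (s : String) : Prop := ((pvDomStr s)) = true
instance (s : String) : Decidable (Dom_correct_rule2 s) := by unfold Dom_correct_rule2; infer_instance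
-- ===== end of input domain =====

-- B replaces A's flag-carrying single scan by a two-mode region scanner (alternative structure, same cost).

-- ===== PORT A =====
-- literal port of A: foldl over enumerate(s), state (flag, target_index, corrected), appends at the end
def pvAStep (st : Bool × List Int × List Char) (p : Int × Char) : Bool × List Int × List Char :=
  let flag := if p.2 = 'e' then true else if p.2 = 's' then false else st.1
  if flag && p.2 == 'c' then (flag, st.2.1 ++ [p.1], st.2.2 ++ ['x'])
  else (flag, st.2.1, st.2.2 ++ [p.2])

def correct_rule2 (s : String) : String × List Int :=
  let r := (PySem.List.enumerate s.toList).foldl pvAStep (false, [], [])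
  (String.mk r.2.2, r.2.1)

-- ===== PORT B =====
-- mutual port of Source B's two while loops (the mode-switch step is fused into the caller so
-- each call consumes the head character; behaviour is exactly Source B's)
mutual
-- outer loop: copy characters until an 'e' opens an active region
def pvOff : List Char → Int → List Char × List Int
  | [], _ => ([], [])
  | c :: cs, i =>
    if c = 'e' then
      let r := pvOn cs (i + 1)
      (c :: r.1, r.2)
    else
      let r := pvOff cs (i + 1)
      (c :: r.1, r.2)
-- inner loop: inside a region rewrite 'c' → 'x' (recording i) until an 's' closes it
def pvOn : List Char → Int → List Char × List Int
  | [], _ => ([], [])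
  | c :: cs, i =>
    if c = 's' then
      let r := pvOff cs (i + 1)
      (c :: r.1, r.2)
    else if c = 'c' then
      let r := pvOn cs (i + 1)
      ('x' :: r.1, i :: r.2)
    else
      let r := pvOn cs (i + 1)
      (c :: r.1, r.2)
end

def correct_rule2_alt (s : String) : String × List Int :=
  let r := pvOff s.toList 0
  (String.mk r.1, r.2)

-- ===== PRECONDITION & SPEC =====
def Spec_correct_rule2 (s : String) (out : String × List Int) : Prop := out = correct_rule2_alt s
instance (s : String) (out : String × List Int) : Decidable (Spec_correct_rule2 s out) := by unfold Spec_correct_rule2; infer_instance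

-- ===== CLAIM (what is proved, stated in full; the proofs are below) =====
def Claim_equal_correct_rule2 : Prop := ∀ (s : String), Dom_correct_rule2 s → Spec_correct_rule2 s (correct_rule2 s)

-- ===== LEMMAS AND PROOFS =====

-- A's foldl, with accumulators pulled out: appending form
lemma pvA_foldl_acc (cs : List Char) (i : Int) (flag : Bool) (idxs : List Int) (corr : List Char) :
    (PySem.List.enumerate cs i).foldl pvAStep (flag, idxs, corr)
      = ((( PySem.List.enumerate cs i).foldl pvAStep (flag, [], [])).1,
         idxs ++ ((PySem.List.enumerate cs i).foldl pvAStep (flag, [], [])).2.1,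
         corr ++ ((PySem.List.enumerate cs i).foldl pvAStep (flag, [], [])).2.2) := by
  induction cs generalizing i flag idxs corr with
  | nil => simp [PySem.List.enumerate_nil]
  | cons c cs ih =>
    rw [PySem.List.enumerate_cons, List.foldl_cons, List.foldl_cons]
    by_cases hcc : ((if c = 'e' then true else if c = 's' then false else flag) && c == 'c') = true
    · have e1 : pvAStep (flag, idxs, corr) (i, c)
          = ((if c = 'e' then true else if c = 's' then false else flag), idxs ++ [i], corr ++ ['x']) := by
        simp only [pvAStep, hcc, if_pos]
      have e2 : pvAStep (flag, ([] : List Int), ([] : List Char)) (i, c)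
          = ((if c = 'e' then true else if c = 's' then false else flag), [i], ['x']) := by
        simp only [pvAStep, hcc, if_pos]; rfl
      rw [e1, e2, ih, ih _ _ [i] ['x']]
      simp
    · have e1 : pvAStep (flag, idxs, corr) (i, c)
          = ((if c = 'e' then true else if c = 's' then false else flag), idxs, corr ++ [c]) := by
        simp only [pvAStep, hcc, if_neg, Bool.not_eq_true]
      have e2 : pvAStep (flag, ([] : List Int), ([] : List Char)) (i, c)
          = ((if c = 'e' then true else if c = 's' then false else flag), [], [c]) := by
        simp only [pvAStep, hcc, if_neg, Bool.not_eq_true]; rfl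
      rw [e1, e2, ih, ih _ _ [] [c]]
      simp

-- the two modes of B equal A's scan with flag = false / true, jointly by induction
lemma pv_modes_eq (cs : List Char) : ∀ (i : Int),
    (pvOff cs i = ((( PySem.List.enumerate cs i).foldl pvAStep (false, [], [])).2.2,
                   ((PySem.List.enumerate cs i).foldl pvAStep (false, [], [])).2.1))
  ∧ (pvOn cs i = ((( PySem.List.enumerate cs i).foldl pvAStep (true, [], [])).2.2,
                  ((PySem.List.enumerate cs i).foldl pvAStep (true, [], [])).2.1)) := by
  induction cs with
  | nil => intro i; simp [pvOff, pvOn, PySem.List.enumerate_nil]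
  | cons c cs ih =>
    intro i
    rw [PySem.List.enumerate_cons]
    constructor
    · by_cases he : c = 'e'
      · have hc : c ≠ 'c' := by simp [he]
        simp only [pvOff, he, if_pos rfl, List.foldl_cons, pvAStep, if_pos rfl]
        rw [pvA_foldl_acc]
        subst he
        simp [(ih (i + 1)).2]
      · by_cases hc : c = 'c'
        · have hs : c ≠ 's' := by simp [hc]
          simp only [pvOff, if_neg he, List.foldl_cons, pvAStep]
          rw [pvA_foldl_acc]
          simp [he, hs, hc, (ih (i + 1)).1]
        · simp only [pvOff, if_neg he, List.foldl_cons, pvAStep]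
          rw [pvA_foldl_acc]
          by_cases hs : c = 's' <;> simp [he, hs, hc, (ih (i + 1)).1]
    · by_cases hs : c = 's'
      · have hc : c ≠ 'c' := by simp [hs]
        have he : c ≠ 'e' := by simp [hs]
        simp only [pvOn, if_pos hs, List.foldl_cons, pvAStep]
        rw [pvA_foldl_acc]
        simp [he, hs, hc, (ih (i + 1)).1]
      · by_cases hc : c = 'c'
        · have he : c ≠ 'e' := by simp [hc]
          simp only [pvOn, if_neg hs, if_pos hc, List.foldl_cons, pvAStep]
          rw [pvA_foldl_acc]
          simp [he, hs, hc, (ih (i + 1)).2]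
        · simp only [pvOn, if_neg hs, if_neg hc, List.foldl_cons, pvAStep]
          rw [pvA_foldl_acc]
          by_cases he : c = 'e' <;> simp [he, hs, hc, (ih (i + 1)).2]

-- ===== VERDICT (by name: the statement is the Claim_ definition above) =====
theorem correct_rule2_spec : Claim_equal_correct_rule2 := by
  intro s _
  unfold Spec_correct_rule2 correct_rule2 correct_rule2_alt
  rw [(pv_modes_eq s.toList 0).1]
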